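-- pv_equiv track=rewrite | github.com/daniel-reich/ubiquitous-fiesta | eSBCbWrG3PY9YYF7c_9.py | sexagenary
-- ===== SOURCE A (Python) =====
-- def sexagenary(yr):
--     stems = ['Wood','Wood','Fire','Fire','Earth','Earth','Metal','Metal','Water','Water']
--     branches = ['Rat','Ox','Tiger','Rabbit','Dragon','Snake','Horse','Sheep','Monkey','Rooster','Dog','Pig']
--     stems += stems*5
--     branches += branches*4
--     cycle = [i+' '+j for i,j in zip(stems,branches)]
--     index = (yr-1984)%60
--     return cycle[index]
-- ===== SOURCE B (Python) =====
-- def sexagenary(yr):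
--     n = (yr - 1984) % 60
--     element = 'Wood Fire Earth Metal Water'.split()[n % 10 // 2]
--     animal = 'Rat Ox Tiger Rabbit Dragon Snake Horse Sheep Monkey Rooster Dog Pig'.split()[n % 12]
--     return element + ' ' + animal
-- ===== Notes on version B (the rewrite author's own statement) =====
-- stated objective: simpler
-- what changed: B drops the 60-element combined cycle (no list extension, no zip, no comprehension) and computes the two components directly: a 5-word element table indexed by (n%10)//2 and a 12-word animal table indexed by n%12 (n = (yr-1984)%60), the tables obtained by splitting one space-separated string each; correct because 10 and 12 divide 60 and each element repeats twice among the stems.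
import Mathlib
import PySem

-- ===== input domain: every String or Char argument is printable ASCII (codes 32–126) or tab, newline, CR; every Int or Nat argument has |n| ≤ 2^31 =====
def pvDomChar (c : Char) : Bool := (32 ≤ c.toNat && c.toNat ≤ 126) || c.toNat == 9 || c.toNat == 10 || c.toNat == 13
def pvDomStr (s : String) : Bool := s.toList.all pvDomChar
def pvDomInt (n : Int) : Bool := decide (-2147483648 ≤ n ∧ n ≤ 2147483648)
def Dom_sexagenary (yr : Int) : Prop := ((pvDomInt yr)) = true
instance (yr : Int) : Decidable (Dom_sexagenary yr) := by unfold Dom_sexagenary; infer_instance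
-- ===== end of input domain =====

-- B drops the combined 60-element cycle and computes element (5-word table, (n%10)//2) and animal (12-word table, n%12) directly.

-- ===== PORT A =====
def sexagenary (yr : Int) : String :=
  let stems : List String := ["Wood","Wood","Fire","Fire","Earth","Earth","Metal","Metal","Water","Water"]
  let branches : List String := ["Rat","Ox","Tiger","Rabbit","Dragon","Snake","Horse","Sheep","Monkey","Rooster","Dog","Pig"]
  let stems2 := stems ++ (stems ++ stems ++ stems ++ stems ++ stems)        -- stems += stems*5
  let branches2 := branches ++ (branches ++ branches ++ branches ++ branches)  -- branches += branches*4
  let cycle := (stems2.zip branches2).map (fun p => p.1 ++ " " ++ p.2)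
  let index := PySem.Int.mod (yr - 1984) 60
  PySem.List.pyGetD cycle index ""   -- index is always in range (0 ≤ index < 60 = len cycle), so the default is never used

-- ===== PORT B =====
def sexagenary_alt (yr : Int) : String :=
  let n := PySem.Int.mod (yr - 1984) 60
  let element := PySem.List.pyGetD (PySem.Str.split₀ "Wood Fire Earth Metal Water")
    (PySem.Int.floordiv (PySem.Int.mod n 10) 2) ""
  let animal := PySem.List.pyGetD
    (PySem.Str.split₀ "Rat Ox Tiger Rabbit Dragon Snake Horse Sheep Monkey Rooster Dog Pig")
    (PySem.Int.mod n 12) ""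
  element ++ " " ++ animal   -- both indices always in range, defaults never used

-- ===== PRECONDITION & SPEC =====
def Spec_sexagenary (yr : Int) (out : String) : Prop := out = sexagenary_alt yr
instance (yr : Int) (out : String) : Decidable (Spec_sexagenary yr out) := by unfold Spec_sexagenary; infer_instance

-- ===== CLAIM (what is proved, stated in full; the proofs are below) =====
def Claim_equal_sexagenary : Prop := ∀ (yr : Int), Dom_sexagenary yr → Spec_sexagenary yr (sexagenary yr)

-- ===== LEMMAS AND PROOFS =====

-- the core residue fact: for each residue k < 60, A's cycle entry equals B's two component lookups
theorem sexagenary_residue (k : Nat) (hk : k < 60) :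
    sexagenary (1984 + (k : Int)) = sexagenary_alt (1984 + (k : Int)) := by
  interval_cases k <;> decide

-- ===== VERDICT (by name: the statement is the Claim_ definition above) =====
theorem sexagenary_spec : Claim_equal_sexagenary := by
  intro yr _
  unfold Spec_sexagenary
  have h60 : (0:Int) < 60 := by norm_num
  set a : Int := yr - 1984 with ha
  have hm0 : 0 ≤ PySem.Int.mod a 60 := PySem.Int.mod_nonneg a h60
  have hm1 : PySem.Int.mod a 60 < 60 := PySem.Int.mod_lt a h60
  set k : Nat := (PySem.Int.mod a 60).toNat with hkdef
  have hk : (k : Int) = PySem.Int.mod a 60 := Int.toNat_of_nonneg hm0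
  have hklt : k < 60 := by omega
  have e60 : PySem.Int.mod a 60 = PySem.Int.mod ((1984 + (k:Int)) - 1984) 60 := by
    rw [PySem.Int.mod_eq_emod_of_pos h60, PySem.Int.mod_eq_emod_of_pos h60]
    have h : (1984 + (k:Int)) - 1984 = (k:Int) := by ring
    rw [h, hk, PySem.Int.mod_eq_emod_of_pos h60]
    exact (Int.emod_emod_of_dvd a (by norm_num)).symm
  show sexagenary yr = sexagenary_alt yr
  unfold sexagenary sexagenary_alt
  simp only [← ha] at *
  rw [e60]
  exact sexagenary_residue k hklt
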